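-- pv_equiv track=rewrite | github.com/invaderDMG/podcast-script | tests/test_cli.py | _events_in
-- ===== SOURCE A (Python) =====
-- def _events_in(stderr: str) -> list[str]:
--     """Pull the ``event=<token>`` value from each logfmt line."""
--     out: list[str] = []
--     for line in stderr.splitlines():
--         for chunk in line.split():
--             if chunk.startswith("event="):
--                 out.append(chunk.removeprefix("event="))
--                 break
--     return out
-- ===== SOURCE B (Python) =====
-- def _events_in(stderr: str) -> list[str]:
--     """Pull the ``event=<token>`` value from each logfmt line.
--
--     Single left-to-right index scan per line instead of building a token list:
--     a match must start at position 0 or right after whitespace, and the value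
--     runs to the next whitespace character (or end of line).
--     """
--     out: list[str] = []
--     for line in stderr.splitlines():
--         n = len(line)
--         i = 0
--         while i < n:
--             if (i == 0 or line[i - 1].isspace()) and line.startswith("event=", i):
--                 j = i + 6
--                 while j < n and not line[j].isspace():
--                     j += 1
--                 out.append(line[i + 6:j])
--                 break
--             i += 1
--     return out
-- ===== Notes on version B (the rewrite author's own statement) =====
-- stated objective: alternative
-- what changed: B replaces A's per-line token split (line.split() plus a chunk loop with startswith/removeprefix) by a single character-index scan of each line that matches 'event=' only at position 0 or right after a whitespace character and slices the value up to the next whitespace.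
import Mathlib
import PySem

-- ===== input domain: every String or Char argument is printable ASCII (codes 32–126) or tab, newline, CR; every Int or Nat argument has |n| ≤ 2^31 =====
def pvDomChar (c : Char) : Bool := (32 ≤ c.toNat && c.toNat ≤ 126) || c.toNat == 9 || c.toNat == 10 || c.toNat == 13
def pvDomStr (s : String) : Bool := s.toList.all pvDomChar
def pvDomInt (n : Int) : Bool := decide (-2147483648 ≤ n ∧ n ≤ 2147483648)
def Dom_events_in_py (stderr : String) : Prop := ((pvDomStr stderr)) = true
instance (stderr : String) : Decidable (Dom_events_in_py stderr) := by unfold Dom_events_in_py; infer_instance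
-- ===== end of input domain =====

-- B replaces A's per-line token split with a single character-index scan per line (alternative decomposition, same result).

-- ===== PORT A =====
-- hand port of str.removeprefix (no PySem primitive): strip p when present, else unchanged; exact
def pvRemoveprefix (s p : String) : String :=
  if PySem.Str.startswith s p then String.ofList (s.toList.drop p.toList.length) else s

-- A's inner 'for chunk in line.split(): … break' loop, with `out` threaded through
def pvALine (out : List String) : List String → List String
  | [] => out
  | t :: ts =>
    if PySem.Str.startswith t "event=" then out ++ [pvRemoveprefix t "event="]
    else pvALine out ts

def events_in_py (stderr : String) : List String :=
  (PySem.Str.splitlines stderr).foldl (fun out line => pvALine out (PySem.Str.split₀ line)) []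

-- ===== PORT B =====
-- Source B's index loop 'while i < n: if (i == 0 or line[i-1].isspace()) and line.startswith("event=", i): …',
-- transcribed structurally: the Bool flag carries "i = 0 or line[i-1].isspace()"; the inner
-- 'while j < n and not line[j].isspace()' scan plus 'line[i+6:j]' is the takeWhile of the tail after "event=".
def pvBScan : Bool → List Char → Option (List Char)
  | _, [] => none
  | atB, c :: cs =>
    if atB && PySem.Chars.startswith (c :: cs) ['e','v','e','n','t','='] then
      some (((c :: cs).drop 6).takeWhile (fun ch => !PySem.Chars.isspace ch))
    else pvBScan (PySem.Chars.isspace c) cs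

def events_in_py_alt (stderr : String) : List String :=
  (PySem.Str.splitlines stderr).foldl
    (fun out line =>
      match pvBScan true line.toList with
      | some v => out ++ [String.ofList v]
      | none => out) []

-- ===== PRECONDITION & SPEC =====
def Spec_events_in_py (stderr : String) (out : List String) : Prop := out = events_in_py_alt stderr
instance (stderr : String) (out : List String) : Decidable (Spec_events_in_py stderr out) := by unfold Spec_events_in_py; infer_instance

-- ===== CLAIM (what is proved, stated in full; the proofs are below) =====
def Claim_equal_events_in_py : Prop := ∀ (stderr : String), Dom_events_in_py stderr → Spec_events_in_py stderr (events_in_py stderr)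

-- ===== LEMMAS AND PROOFS =====

-- proof-only word splitter: the direct (non-accumulator) form of Python's line.split()
def pvWords (cs : List Char) : List (List Char) :=
  match cs with
  | [] => []
  | c :: rest =>
    if PySem.Chars.isspace c then pvWords rest
    else (c :: rest.takeWhile (fun x => !PySem.Chars.isspace x)) ::
         pvWords (rest.dropWhile (fun x => !PySem.Chars.isspace x))
termination_by cs.length
decreasing_by
  · simp
  · have := List.length_dropWhile_le (fun x => !PySem.Chars.isspace x) rest
    simp at this ⊢; omega

theorem pv_go_eq (rest cur : List Char) (acc : List (List Char)) :
    PySem.Chars.split₀.go rest cur acc =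
      acc.reverse ++ (if cur.isEmpty then pvWords rest
        else (cur.reverse ++ rest.takeWhile (fun x => !PySem.Chars.isspace x)) ::
             pvWords (rest.dropWhile (fun x => !PySem.Chars.isspace x))) := by
  induction rest generalizing cur acc with
  | nil =>
    cases cur <;> simp [PySem.Chars.split₀.go, pvWords]
  | cons c rest ih =>
    by_cases hc : PySem.Chars.isspace c = true
    · cases cur with
      | nil => simp [PySem.Chars.split₀.go, hc, ih, pvWords]
      | cons d ds => simp [PySem.Chars.split₀.go, hc, ih, pvWords]
    · cases cur with
      | nil => simp [PySem.Chars.split₀.go, hc, ih, pvWords]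
      | cons d ds => simp [PySem.Chars.split₀.go, hc, ih]

theorem pv_split₀_eq_words (cs : List Char) : PySem.Chars.split₀ cs = pvWords cs := by
  simp [PySem.Chars.split₀, pv_go_eq]

-- dropping inside the takeWhile-run commutes with takeWhile
theorem pv_takeWhile_drop (p : Char → Bool) (n : Nat) (l : List Char)
    (h : n ≤ (l.takeWhile p).length) :
    (l.takeWhile p).drop n = (l.drop n).takeWhile p := by
  induction n generalizing l with
  | zero => simp
  | succ n ih =>
    cases l with
    | nil => simp
    | cons c cs =>
      by_cases hc : p c = true
      · simpa [hc] using ih cs (by simpa [hc] using h)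
      · simp [hc] at h

-- a prefix made of p-chars survives takeWhile p
theorem pv_isPrefixOf_takeWhile (p : Char → Bool) (pf l : List Char)
    (hp : ∀ a ∈ pf, p a = true) :
    pf.isPrefixOf (l.takeWhile p) = pf.isPrefixOf l := by
  induction pf generalizing l with
  | nil => simp
  | cons a pf ih =>
    cases l with
    | nil => simp
    | cons c cs =>
      by_cases hc : p c = true
      · simp [hc, List.isPrefixOf, ih cs (fun x hx => hp x (List.mem_cons_of_mem _ hx))]
      · have : (a == c) = false := by
          by_cases hac : a = c
          · subst hac; simp [hp a (List.mem_cons_self)] at hc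
          · simp [hac]
        simp [hc, List.isPrefixOf, this]

-- skipping the rest of a token: B's scan with the flag down restarts at the next whitespace
theorem pv_bscan_false (l : List Char) :
    pvBScan false l = pvBScan true (l.dropWhile (fun x => !PySem.Chars.isspace x)) := by
  induction l with
  | nil => simp [pvBScan]
  | cons c cs ih =>
    by_cases hc : PySem.Chars.isspace c = true
    · have : PySem.Chars.startswith (c :: cs) ['e','v','e','n','t','='] = false := by
        have : (Char.ofNat 101 == c) = false := by
          by_cases h : ('e' : Char) = c
          · exfalso; rw [← h] at hc; simp [PySem.Chars.isspace] at hc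
          · simpa using h
        simp [PySem.Chars.startswith, List.isPrefixOf]
        intro h; exfalso; rw [← h] at hc; simp [PySem.Chars.isspace] at hc
      simp [pvBScan, hc, this]
    · simp [pvBScan, hc, ih]

-- per-line equivalence of the two scans
theorem pv_main (cs : List Char) (out : List String) :
    pvALine out ((pvWords cs).map String.ofList) =
      (match pvBScan true cs with
       | some v => out ++ [String.ofList v]
       | none => out) := by
  induction hn : cs.length using Nat.strong_induction_on generalizing cs out with
  | _ n ih =>
  cases cs with
  | nil => simp [pvWords, pvALine, pvBScan]
  | cons c rest =>
    by_cases hc : PySem.Chars.isspace c = true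
    · have hsw : PySem.Chars.startswith (c :: rest) ['e','v','e','n','t','='] = false := by
        simp [PySem.Chars.startswith, List.isPrefixOf]
        intro h; exfalso; rw [← h] at hc; simp [PySem.Chars.isspace] at hc
      rw [pvWords]
      simp only [hc, if_pos]
      rw [ih rest.length (by simp [← hn]) rest out rfl]
      simp [pvBScan, hsw, hc]
    · have hne : (!PySem.Chars.isspace c) = true := by simp [hc]
      have htw : (c :: rest).takeWhile (fun x => !PySem.Chars.isspace x)
          = c :: rest.takeWhile (fun x => !PySem.Chars.isspace x) := by
        simp [hne]
      have hp : ∀ a ∈ (['e','v','e','n','t','='] : List Char), (!PySem.Chars.isspace a) = true := by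
        intro a ha
        simp only [List.mem_cons, List.not_mem_nil, or_false] at ha
        rcases ha with rfl|rfl|rfl|rfl|rfl|rfl <;> rfl
      have hpre := pv_isPrefixOf_takeWhile (fun x => !PySem.Chars.isspace x)
        ['e','v','e','n','t','='] (c :: rest) hp
      rw [htw] at hpre
      rw [pvWords]
      simp only [hc, if_neg, Bool.false_eq_true, not_false_iff, List.map_cons]
      by_cases hsw : (['e','v','e','n','t','='] : List Char).isPrefixOf
          (c :: rest.takeWhile (fun x => !PySem.Chars.isspace x)) = true
      · -- the first token starts with "event=": both sides return its remainder
        have h6 : 6 ≤ (c :: rest.takeWhile (fun x => !PySem.Chars.isspace x)).length := by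
          have := (List.isPrefixOf_iff_prefix.mp hsw).length_le
          simpa using this
        have hdrop : (c :: rest.takeWhile (fun x => !PySem.Chars.isspace x)).drop 6
            = ((c :: rest).drop 6).takeWhile (fun x => !PySem.Chars.isspace x) := by
          rw [← htw]
          exact pv_takeWhile_drop _ 6 (c :: rest) (by rw [htw]; exact h6)
        rw [pvALine]
        simp only [PySem.Str.startswith_eq, String.toList_ofList]
        have hevt : ("event=" : String).toList = ['e','v','e','n','t','='] := rfl
        simp only [hevt, PySem.Chars.startswith, hsw, if_pos]
        rw [pvBScan]
        simp only [PySem.Chars.startswith, hpre ▸ hsw, Bool.and_true, if_pos]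
        simp [pvRemoveprefix, PySem.Str.startswith_eq, hevt, PySem.Chars.startswith, hsw, hdrop]
      · -- no match in this token: skip it on both sides
        have hsw2 : (['e','v','e','n','t','='] : List Char).isPrefixOf
            (c :: rest.takeWhile (fun x => !PySem.Chars.isspace x)) = false :=
          eq_false_of_ne_true hsw
        have hsw' : (['e','v','e','n','t','='] : List Char).isPrefixOf (c :: rest) = false :=
          hpre.symm.trans hsw2
        rw [pvALine]
        have hevt : ("event=" : String).toList = ['e','v','e','n','t','='] := rfl
        simp only [PySem.Str.startswith_eq, String.toList_ofList, hevt,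
          PySem.Chars.startswith, hsw2, Bool.false_eq_true, if_neg, not_false_iff]
        rw [pvBScan]
        simp only [PySem.Chars.startswith, hsw', Bool.and_false, Bool.false_eq_true,
          if_neg, not_false_iff, hc]
        rw [pv_bscan_false]
        have hlen : (rest.dropWhile (fun x => !PySem.Chars.isspace x)).length < n := by
          have := List.length_dropWhile_le (fun x => !PySem.Chars.isspace x) rest
          simp at hn; omega
        exact ih _ hlen _ out rfl

-- lift pv_main to whole strings and fold over the lines
theorem pv_line (line : String) (out : List String) :
    pvALine out (PySem.Str.split₀ line) =
      (match pvBScan true line.toList with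
       | some v => out ++ [String.ofList v]
       | none => out) := by
  have : PySem.Str.split₀ line = (pvWords line.toList).map String.ofList := by
    simp [PySem.Str.split₀, pv_split₀_eq_words]
  rw [this, pv_main]

theorem events_in_py_spec : Claim_equal_events_in_py := by
  intro stderr _
  unfold Spec_events_in_py events_in_py events_in_py_alt
  induction PySem.Str.splitlines stderr using List.reverseRecOn with
  | nil => rfl
  | append_singleton ls l ih => simp only [List.foldl_append, List.foldl_cons, List.foldl_nil, pv_line]
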